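-- pv_equiv track=rewrite | github.com/aliuyar1234/autoresearch-lab | lab/scheduler/select.py | lane_mix_sequence
-- ===== SOURCE A (Python) =====
-- DEFAULT_LANE_MIX: tuple[tuple[str, int], ...] = (("scout", 3), ("main", 2), ("confirm", 1))
--
-- def lane_mix_sequence(count: int, lane_mix: tuple[tuple[str, int], ...] = DEFAULT_LANE_MIX) -> list[str]:
--     sequence: list[str] = []
--     while len(sequence) < count:
--         for lane, weight in lane_mix:
--             sequence.extend([lane] * max(0, weight))
--             if len(sequence) >= count:
--                 return sequence[:count]
--     return sequence[:count]
-- ===== SOURCE B (Python) =====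
-- DEFAULT_LANE_MIX: tuple[tuple[str, int], ...] = (("scout", 3), ("main", 2), ("confirm", 1))
--
-- def lane_mix_sequence(count: int, lane_mix: tuple[tuple[str, int], ...] = DEFAULT_LANE_MIX) -> list[str]:
--     # build one cycle of the pattern (never more than count entries), then tile it flatly
--     block: list[str] = []
--     for lane, weight in lane_mix:
--         need = count - len(block)
--         if need <= 0:
--             break
--         block.extend([lane] * min(max(0, weight), need))
--     sequence: list[str] = []
--     while len(sequence) < count:
--         sequence.extend(block)
--     return sequence[:count]
-- ===== Notes on version B (the rewrite author's own statement) =====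
-- stated objective: alternative
-- what changed: B precomputes one cycle of the pattern (capped at count entries) in a single pass over lane_mix, then tiles it with one flat while-extend loop, replacing A's per-lane nested loop with mid-loop early returns.
import Mathlib
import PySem

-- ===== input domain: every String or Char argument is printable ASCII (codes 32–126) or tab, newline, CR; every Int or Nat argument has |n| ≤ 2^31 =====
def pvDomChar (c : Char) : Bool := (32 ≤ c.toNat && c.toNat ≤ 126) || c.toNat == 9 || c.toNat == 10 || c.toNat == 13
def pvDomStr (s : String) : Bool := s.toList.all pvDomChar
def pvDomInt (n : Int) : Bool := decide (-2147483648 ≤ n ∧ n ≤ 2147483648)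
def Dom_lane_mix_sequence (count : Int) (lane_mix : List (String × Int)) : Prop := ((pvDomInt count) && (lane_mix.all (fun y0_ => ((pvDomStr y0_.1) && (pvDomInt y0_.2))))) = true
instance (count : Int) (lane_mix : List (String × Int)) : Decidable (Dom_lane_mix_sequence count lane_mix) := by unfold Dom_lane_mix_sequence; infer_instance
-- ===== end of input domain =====

-- B builds one cycle of the pattern (capped at count entries) once and tiles it with a flat
-- loop, replacing A's per-lane nested loop with mid-loop early returns (alternative decomposition).


-- ===== PORT A =====
-- the inner 'for lane, weight in lane_mix' loop: .inl r = early 'return sequence[:count]',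
-- .inr s = loop finished, continue the outer while with sequence s
def pvInnerA (count : Int) : List (String × Int) → List String → (List String ⊕ List String)
  | [], seq => .inr seq
  | (lane, weight) :: rest, seq =>
      let seq' := seq ++ List.replicate (max 0 weight).toNat lane
      if count ≤ (seq'.length : Int) then .inl (PySem.List.slice seq' none (some count))
      else pvInnerA count rest seq'

-- the outer 'while len(sequence) < count' loop; fuel only makes the recursion total
-- (under Pre_ the fuel count.toNat + 1 is never exhausted)
def pvOuterA (count : Int) (lane_mix : List (String × Int)) : Nat → List String → List String
  | 0, seq => PySem.List.slice seq none (some count)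
  | fuel + 1, seq =>
      if (seq.length : Int) < count then
        match pvInnerA count lane_mix seq with
        | .inl r => r
        | .inr s => pvOuterA count lane_mix fuel s
      else PySem.List.slice seq none (some count)

def lane_mix_sequence (count : Int) (lane_mix : List (String × Int)) : List String :=
  pvOuterA count lane_mix (count.toNat + 1) []

-- ===== PORT B =====
-- 'for lane, weight in lane_mix: need = count - len(block); if need <= 0: break;
--  block.extend([lane] * min(max(0, weight), need))'
def pvBlockB (count : Int) : List (String × Int) → List String → List String
  | [], block => block
  | (lane, weight) :: rest, block =>
      if count - (block.length : Int) ≤ 0 then block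
      else pvBlockB count rest
        (block ++ List.replicate (min (max 0 weight) (count - (block.length : Int))).toNat lane)

-- 'while len(sequence) < count: sequence.extend(block)'; fuel only makes the recursion total
def pvTileB (count : Int) (block : List String) : Nat → List String → List String
  | 0, seq => seq
  | fuel + 1, seq =>
      if (seq.length : Int) < count then pvTileB count block fuel (seq ++ block) else seq

def lane_mix_sequence_alt (count : Int) (lane_mix : List (String × Int)) : List String :=
  PySem.List.slice (pvTileB count (pvBlockB count lane_mix []) (count.toNat + 1) [])
    none (some count)

-- ===== PRECONDITION & SPEC =====
-- (no Pre_: on inputs where Python A loops forever — count > 0 with no positive weight —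
-- Python B loops forever too, and both fuelled ports agree; the equivalence is total)
def Spec_lane_mix_sequence (count : Int) (lane_mix : List (String × Int)) (out : List String) : Prop := out = lane_mix_sequence_alt count lane_mix
instance (count : Int) (lane_mix : List (String × Int)) (out : List String) : Decidable (Spec_lane_mix_sequence count lane_mix out) := by unfold Spec_lane_mix_sequence; infer_instance

-- ===== CLAIM (what is proved, stated in full; the proofs are below) =====
def Claim_equal_lane_mix_sequence : Prop := ∀ (count : Int) (lane_mix : List (String × Int)), Dom_lane_mix_sequence count lane_mix → Spec_lane_mix_sequence count lane_mix (lane_mix_sequence count lane_mix)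

-- ===== LEMMAS AND PROOFS =====

-- the untruncated one-cycle pattern (proof device linking the two ports)
def pvFullBlock (lane_mix : List (String × Int)) : List String :=
  lane_mix.flatMap (fun p => List.replicate (max 0 p.2).toNat p.1)

-- a prefix slice to a bound inside xs ignores anything appended after xs
theorem pvSlice_prefix (xs t : List String) (count : Int) (h0 : 0 ≤ count)
    (h : count ≤ (xs.length : Int)) :
    PySem.List.slice (xs ++ t) none (some count) = PySem.List.slice xs none (some count) := by
  have hc : count = ((count.toNat : Nat) : Int) := (Int.toNat_of_nonneg h0).symm
  rw [hc, PySem.List.slice_to_natCast, PySem.List.slice_to_natCast]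
  exact List.take_append_of_le_length (by omega)

-- A's inner for-loop over the whole lane mix, characterised through the full cycle
theorem pvInnerA_eq (count : Int) :
    ∀ (lm : List (String × Int)) (seq : List String), (seq.length : Int) < count →
      pvInnerA count lm seq =
        (if count ≤ ((seq ++ pvFullBlock lm).length : Int)
          then .inl (PySem.List.slice (seq ++ pvFullBlock lm) none (some count))
          else .inr (seq ++ pvFullBlock lm)) := by
  intro lm
  induction lm with
  | nil =>
      intro seq hlt
      simp [pvInnerA, pvFullBlock]
      omega
  | cons p rest ih =>
      intro seq hlt
      obtain ⟨lane, weight⟩ := p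
      have hblock : pvFullBlock ((lane, weight) :: rest)
          = List.replicate (max 0 weight).toNat lane ++ pvFullBlock rest := by
        simp [pvFullBlock]
      have hunfold : pvInnerA count ((lane, weight) :: rest) seq =
          (if count ≤ ((seq ++ List.replicate (max 0 weight).toNat lane).length : Int)
            then .inl (PySem.List.slice (seq ++ List.replicate (max 0 weight).toNat lane)
                        none (some count))
            else pvInnerA count rest (seq ++ List.replicate (max 0 weight).toNat lane)) := rfl
      set seq' := seq ++ List.replicate (max 0 weight).toNat lane with hseq'
      by_cases hstop : count ≤ (seq'.length : Int)
      · have hge : count ≤ ((seq ++ pvFullBlock ((lane, weight) :: rest)).length : Int) := by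
          rw [hblock, ← List.append_assoc, ← hseq']
          simp only [List.length_append, Nat.cast_add]
          omega
        rw [hunfold, if_pos hstop, if_pos hge, hblock, ← List.append_assoc, ← hseq']
        rw [pvSlice_prefix seq' (pvFullBlock rest) count (by omega) hstop]
      · have hlt' : (seq'.length : Int) < count := by omega
        rw [hunfold, if_neg hstop, ih seq' hlt', hblock, ← List.append_assoc, ← hseq']

-- once the tile is long enough, B's while loop stops at once
theorem pvTileB_of_ge (count : Int) (block : List String) :
    ∀ (fuel : Nat) (seq : List String), count ≤ (seq.length : Int) →
      pvTileB count block fuel seq = seq := by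
  intro fuel seq h
  cases fuel with
  | zero => rfl
  | succ n => simp [pvTileB]; omega

-- A's whole loop equals tiling the FULL cycle, step for step (fuel exhaustion agrees too)
theorem pvOuterA_eq_tile (count : Int) (lm : List (String × Int)) :
    ∀ (fuel : Nat) (seq : List String),
      pvOuterA count lm fuel seq =
        PySem.List.slice (pvTileB count (pvFullBlock lm) fuel seq) none (some count) := by
  intro fuel
  induction fuel with
  | zero => intro seq; rfl
  | succ n ih =>
      intro seq
      by_cases hlt : (seq.length : Int) < count
      · have hA : pvOuterA count lm (n + 1) seq
              = (match pvInnerA count lm seq with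
                 | .inl r => r
                 | .inr s => pvOuterA count lm n s) := by
          simp only [pvOuterA, if_pos hlt]
        have hB : pvTileB count (pvFullBlock lm) (n + 1) seq
              = pvTileB count (pvFullBlock lm) n (seq ++ pvFullBlock lm) := by
          simp only [pvTileB, if_pos hlt]
        rw [hA, hB, pvInnerA_eq count lm seq hlt]
        by_cases hge : count ≤ ((seq ++ pvFullBlock lm).length : Int)
        · rw [if_pos hge]
          rw [pvTileB_of_ge count (pvFullBlock lm) n (seq ++ pvFullBlock lm) hge]
        · rw [if_neg hge]
          exact ih (seq ++ pvFullBlock lm)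
      · have hA : pvOuterA count lm (n + 1) seq
              = PySem.List.slice seq none (some count) := by
          simp only [pvOuterA, if_neg hlt]
        rw [hA, pvTileB_of_ge count (pvFullBlock lm) (n + 1) seq (by omega)]

-- truncating a replicate block to what still fits is invisible under the outer take
theorem pvTake_min_replicate (w k : Nat) (a : String) (t : List String) :
    (List.replicate (min w k) a ++ t).take k = (List.replicate w a ++ t).take k := by
  by_cases h : w ≤ k
  · rw [min_eq_left h]
  · rw [min_eq_right (by omega)]
    rw [List.take_append_of_le_length (by simp), List.take_append_of_le_length (by simp; omega)]
    simp [List.take_replicate]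
    omega

-- B's block builder computes the count-truncated full cycle
theorem pvBlockB_eq (count : Int) :
    ∀ (lm : List (String × Int)) (b : List String), (b.length : Int) ≤ count →
      pvBlockB count lm b = (b ++ pvFullBlock lm).take count.toNat := by
  intro lm
  induction lm with
  | nil =>
      intro b hb
      simp only [pvBlockB, pvFullBlock, List.flatMap_nil, List.append_nil]
      exact (List.take_of_length_le (by omega)).symm
  | cons p rest ih =>
      intro b hb
      obtain ⟨lane, weight⟩ := p
      have hblock : pvFullBlock ((lane, weight) :: rest)
          = List.replicate (max 0 weight).toNat lane ++ pvFullBlock rest := by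
        simp [pvFullBlock]
      have hunfold : pvBlockB count ((lane, weight) :: rest) b =
          (if count - (b.length : Int) ≤ 0 then b
            else pvBlockB count rest
              (b ++ List.replicate (min (max 0 weight) (count - (b.length : Int))).toNat lane)) := rfl
      by_cases h : count - (b.length : Int) ≤ 0
      · rw [hunfold, if_pos h, hblock, ← List.append_assoc]
        rw [List.take_append_of_le_length (by simp; omega)]
        rw [List.take_append_of_le_length (by omega)]
        rw [List.take_of_length_le (by omega)]
      · set m := (min (max 0 weight) (count - (b.length : Int))).toNat with hm
        have hlenm : (m : Int) ≤ count - (b.length : Int) := by omega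
        have hb' : (((b ++ List.replicate m lane).length : Nat) : Int) ≤ count := by
          simp only [List.length_append, List.length_replicate, Nat.cast_add]
          omega
        rw [hunfold, if_neg h, ih _ hb', hblock, List.append_assoc]
        conv_lhs => rw [List.take_append]
        conv_rhs => rw [List.take_append]
        congr 1
        have hmin : m = min (max 0 weight).toNat (count.toNat - b.length) := by omega
        rw [hmin]
        exact pvTake_min_replicate (max 0 weight).toNat (count.toNat - b.length) lane
          (pvFullBlock rest)

-- tiling the truncated cycle gives the same count-slice as tiling the full cycle
theorem pvTile_trunc (count : Int) (lm : List (String × Int)) :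
    PySem.List.slice (pvTileB count (pvBlockB count lm []) (count.toNat + 1) []) none (some count)
      = PySem.List.slice (pvTileB count (pvFullBlock lm) (count.toNat + 1) []) none (some count) := by
  by_cases hc : count ≤ 0
  · have h1 : pvTileB count (pvBlockB count lm []) (count.toNat + 1) [] = [] :=
      pvTileB_of_ge count _ _ [] (by simp; omega)
    have h2 : pvTileB count (pvFullBlock lm) (count.toNat + 1) [] = [] :=
      pvTileB_of_ge count _ _ [] (by simp; omega)
    rw [h1, h2]
  · have hb : pvBlockB count lm [] = (pvFullBlock lm).take count.toNat := by
      have := pvBlockB_eq count lm [] (by simp; omega)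
      simpa using this
    by_cases hlen : (pvFullBlock lm).length ≤ count.toNat
    · rw [hb, List.take_of_length_le hlen]
    · -- count ≤ |full|: both loops finish after one extend; both slices are take count
      have hcount : count = ((count.toNat : Nat) : Int) := by omega
      have hstep1 : pvTileB count ((pvFullBlock lm).take count.toNat) (count.toNat + 1) []
          = pvTileB count ((pvFullBlock lm).take count.toNat) count.toNat
              ([] ++ (pvFullBlock lm).take count.toNat) := by
        simp only [pvTileB]
        rw [if_pos (by simp; omega)]
      have hstep2 : pvTileB count (pvFullBlock lm) (count.toNat + 1) []
          = pvTileB count (pvFullBlock lm) count.toNat ([] ++ pvFullBlock lm) := by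
        simp only [pvTileB]
        rw [if_pos (by simp; omega)]
      rw [hb, hstep1, hstep2]
      rw [pvTileB_of_ge count _ count.toNat _ (by simp [List.length_take]; omega)]
      rw [pvTileB_of_ge count _ count.toNat _ (by simp; omega)]
      simp only [List.nil_append]
      rw [hcount, PySem.List.slice_to_natCast, PySem.List.slice_to_natCast]
      simp [List.take_take]

-- ===== VERDICT (by name: the statement is the Claim_ definition above) =====
theorem lane_mix_sequence_spec : Claim_equal_lane_mix_sequence := by
  intro count lane_mix _
  unfold Spec_lane_mix_sequence lane_mix_sequence lane_mix_sequence_alt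
  rw [pvOuterA_eq_tile count lane_mix (count.toNat + 1) [], pvTile_trunc count lane_mix]
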